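-- pv_equiv track=rewrite | github.com/GrahamStrickland/epi | ch05/test/test_dutch_national_flag_three_values.py | is_partitioned
-- ===== SOURCE A (Python) =====
-- def is_partitioned(A: list[int]) -> bool:
--     j = 0
--     for _ in range(3):
--         if j >= len(A):
--             break
--         val = A[j]
--         while j < len(A) and A[j] == val:
--             j += 1
--
--     return j == len(A)
-- ===== SOURCE B (Python) =====
-- def is_partitioned(A: list[int]) -> bool:
--     transitions = sum(1 for x, y in zip(A, A[1:]) if x != y)
--     return len(A) == 0 or transitions <= 2
-- ===== Notes on version B (the rewrite author's own statement) =====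
-- stated objective: idiomatic
-- what changed: Replaces the run-consuming nested while loop with index state and early break by a single zip pass counting adjacent transitions, returning empty-or-at-most-2-transitions.
import Mathlib
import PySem

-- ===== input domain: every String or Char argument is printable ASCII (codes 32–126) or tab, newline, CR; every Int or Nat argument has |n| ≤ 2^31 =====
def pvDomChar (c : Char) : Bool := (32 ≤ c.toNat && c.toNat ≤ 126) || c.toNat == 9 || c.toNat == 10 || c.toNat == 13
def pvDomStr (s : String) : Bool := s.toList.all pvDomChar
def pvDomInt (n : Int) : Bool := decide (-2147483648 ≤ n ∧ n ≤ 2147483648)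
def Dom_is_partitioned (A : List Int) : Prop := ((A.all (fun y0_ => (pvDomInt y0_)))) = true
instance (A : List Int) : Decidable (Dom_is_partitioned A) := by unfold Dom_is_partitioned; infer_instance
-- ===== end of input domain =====

-- B replaces A's run-consuming nested while loop (index j, run counter, early break) by a
-- single zip pass counting adjacent transitions; same O(n) cost, more idiomatic.

-- ===== PORT A =====
-- inner `while j < len(A) and A[j] == val: j += 1` (A[j] is only read with j in range, so getD is exact)
def pvConsume (A : List Int) (val : Int) (j : Nat) : Nat :=
  if h : j < A.length ∧ A.getD j 0 = val then pvConsume A val (j + 1) else j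
termination_by A.length - j
decreasing_by omega

def is_partitioned (A : List Int) : Bool :=
  -- `for _ in range(3): if j >= len(A): break; val = A[j]; while …`
  -- (the break is modelled by the identity branch: once j ≥ len(A) it stays there)
  let j := List.foldl
    (fun j _ => if A.length ≤ j then j else pvConsume A (A.getD j 0) j)
    0 (List.range 3)
  decide (j = A.length)

-- ===== PORT B =====
def is_partitioned_alt (A : List Int) : Bool :=
  -- transitions = sum(1 for x, y in zip(A, A[1:]) if x != y)   (A[1:] = A.drop 1)
  let transitions : Nat :=
    (A.zip (A.drop 1)).foldl (fun acc p => if p.1 ≠ p.2 then acc + 1 else acc) 0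
  decide (A.length = 0) || decide (transitions ≤ 2)

-- ===== PRECONDITION & SPEC =====
def Spec_is_partitioned (A : List Int) (out : Bool) : Prop := out = is_partitioned_alt A
instance (A : List Int) (out : Bool) : Decidable (Spec_is_partitioned A out) := by unfold Spec_is_partitioned; infer_instance

-- ===== CLAIM (what is proved, stated in full; the proofs are below) =====
def Claim_equal_is_partitioned : Prop := ∀ (A : List Int), Dom_is_partitioned A → Spec_is_partitioned A (is_partitioned A)

-- ===== LEMMAS AND PROOFS =====

/-- Drop the leading run of equal values. -/
def dropRun : List Int → List Int
  | [] => []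
  | x :: xs => xs.dropWhile (fun a => a == x)

/-- Number of adjacent transitions (indices i ≥ 1 with A[i] ≠ A[i-1]). -/
def cnt : List Int → Nat
  | [] => 0
  | [_] => 0
  | x :: y :: t => (if x ≠ y then 1 else 0) + cnt (y :: t)

/-- The inner while loop lands in range and leaves exactly the suffix past the `val`-run. -/
theorem pvConsume_spec (A : List Int) (val : Int) (j : Nat) (hj : j ≤ A.length) :
    pvConsume A val j ≤ A.length ∧
      A.drop (pvConsume A val j) = (A.drop j).dropWhile (fun a => a == val) := by
  rw [pvConsume]
  split
  · rename_i h
    have hdrop : A.drop j = A[j] :: A.drop (j + 1) := List.drop_eq_getElem_cons h.1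
    have hget : A.getD j 0 = A[j] := List.getD_eq_getElem A 0 h.1
    have ih := pvConsume_spec A val (j + 1) (by omega)
    refine ⟨ih.1, ?_⟩
    rw [ih.2, hdrop, List.dropWhile_cons]
    have hv : A[j] = val := by rw [← hget]; exact h.2
    simp [hv]
  · rename_i h
    rcases Nat.lt_or_ge j A.length with hlt | hge
    · have hget : A.getD j 0 = A[j] := List.getD_eq_getElem A 0 hlt
      have hne : A[j] ≠ val := by intro e; exact h ⟨hlt, by rw [hget, e]⟩
      rw [List.drop_eq_getElem_cons hlt, List.dropWhile_cons]
      simp [hne, hj]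
    · have : j = A.length := le_antisymm hj hge
      simp [this, List.drop_length]
termination_by A.length - j
decreasing_by rename_i h; omega

/-- One iteration of A's outer loop drops one run from the remaining suffix. -/
theorem step_drop (A : List Int) (j : Nat) (hj : j ≤ A.length) :
    (if A.length ≤ j then j else pvConsume A (A.getD j 0) j) ≤ A.length ∧
      A.drop (if A.length ≤ j then j else pvConsume A (A.getD j 0) j) = dropRun (A.drop j) := by
  split
  · rename_i h
    have : j = A.length := le_antisymm hj h
    simp [this, List.drop_length, dropRun]
  · rename_i h
    have hlt : j < A.length := by omega
    have hs := pvConsume_spec A (A.getD j 0) j hj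
    refine ⟨hs.1, ?_⟩
    rw [hs.2, List.drop_eq_getElem_cons hlt, List.getD_eq_getElem A 0 hlt, dropRun,
      List.dropWhile_cons]
    simp

theorem iter_dropRun_nil (k : Nat) : dropRun^[k] ([] : List Int) = [] := by
  induction k with
  | zero => rfl
  | succ k ih => rw [Function.iterate_succ_apply]; simpa [dropRun] using ih

theorem cnt_dropRun (x : Int) (xs : List Int) :
    cnt (x :: xs) = (match xs.dropWhile (fun a => a == x) with
      | [] => 0
      | l => 1 + cnt l) := by
  induction xs with
  | nil => simp [cnt]
  | cons y t ih =>
    by_cases hxy : y = x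
    · subst hxy
      have : cnt (y :: y :: t) = cnt (y :: t) := by simp [cnt]
      rw [this, ih, List.dropWhile_cons]
      simp
    · have hne : (y == x) = false := by simp [hxy]
      have hxy' : x ≠ y := fun h => hxy h.symm
      simp [hne, cnt, hxy']

theorem cnt_dropRun_nil (x : Int) (xs : List Int)
    (h : xs.dropWhile (fun a => a == x) = []) : cnt (x :: xs) = 0 := by
  rw [cnt_dropRun, h]

theorem cnt_dropRun_cons (x : Int) (xs : List Int) (y : Int) (t : List Int)
    (h : xs.dropWhile (fun a => a == x) = y :: t) : cnt (x :: xs) = 1 + cnt (y :: t) := by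
  rw [cnt_dropRun, h]

/-- A nonempty list vanishes after dropping k+1 runs iff it has at most k transitions. -/
theorem iter_dropRun_nil_iff (k : Nat) (x : Int) (xs : List Int) :
    (dropRun^[k + 1] (x :: xs) = [] ↔ cnt (x :: xs) ≤ k) := by
  induction k generalizing x xs with
  | zero =>
    rw [Function.iterate_one]
    cases h : xs.dropWhile (fun a => a == x) with
    | nil => simp [dropRun, h, cnt_dropRun_nil x xs h]
    | cons y t => simp [dropRun, h, cnt_dropRun_cons x xs y t h]
  | succ k ih =>
    rw [Function.iterate_succ_apply]
    cases h : xs.dropWhile (fun a => a == x) with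
    | nil =>
      rw [cnt_dropRun_nil x xs h]
      simp only [dropRun, h]
      simpa using iter_dropRun_nil (k + 1)
    | cons y t =>
      rw [cnt_dropRun_cons x xs y t h]
      simp only [dropRun, h]
      rw [ih y t]
      omega

/-- B's zip fold computes the transition count. -/
theorem zip_fold (A : List Int) (n : Nat) :
    (A.zip (A.drop 1)).foldl (fun acc p => if p.1 ≠ p.2 then acc + 1 else acc) n
      = n + cnt A := by
  induction A generalizing n with
  | nil => simp [cnt]
  | cons x xs ih =>
    cases xs with
    | nil => simp [cnt]
    | cons y t =>
      have := ih (n := (if x ≠ y then n + 1 else n))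
      simp only [List.drop_succ_cons, List.drop_zero, List.zip_cons_cons, List.foldl_cons] at *
      rw [this, cnt]
      split_ifs <;> omega

theorem alt_char (A : List Int) :
    is_partitioned_alt A = decide (dropRun (dropRun (dropRun A)) = []) := by
  cases A with
  | nil => simp [is_partitioned_alt, dropRun]
  | cons x xs =>
    have h3 : dropRun (dropRun (dropRun (x :: xs))) = dropRun^[2 + 1] (x :: xs) := by
      simp [Function.iterate_succ_apply']
    unfold is_partitioned_alt
    rw [zip_fold, h3]
    simp only [Nat.zero_add]
    rw [show (decide ((x :: xs).length = 0)) = false from by simp, Bool.false_or,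
      decide_eq_decide]
    exact (iter_dropRun_nil_iff 2 x xs).symm

theorem main_eq (A : List Int) : is_partitioned A = is_partitioned_alt A := by
  have hrange : List.range 3 = [0, 1, 2] := by decide
  unfold is_partitioned
  rw [hrange]
  simp only [List.foldl_cons, List.foldl_nil]
  have s1 := step_drop A 0 (Nat.zero_le _)
  set j1 := (if A.length ≤ 0 then 0 else pvConsume A (A.getD 0 0) 0) with hj1
  have s2 := step_drop A j1 s1.1
  set j2 := (if A.length ≤ j1 then j1 else pvConsume A (A.getD j1 0) j1) with hj2
  have s3 := step_drop A j2 s2.1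
  set j3 := (if A.length ≤ j2 then j2 else pvConsume A (A.getD j2 0) j2) with hj3
  have hdrop : A.drop j3 = dropRun (dropRun (dropRun A)) := by
    rw [s3.2, s2.2, s1.2, List.drop_zero]
  have hiff : j3 = A.length ↔ dropRun (dropRun (dropRun A)) = [] := by
    rw [← hdrop, List.drop_eq_nil_iff]
    constructor
    · intro h; omega
    · intro h
      have := s3.1
      omega
  rw [alt_char, decide_eq_decide]
  exact hiff

-- ===== VERDICT (by name: the statement is the Claim_ definition above) =====
theorem is_partitioned_spec : Claim_equal_is_partitioned := by
  intro A _
  exact main_eq A
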